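-- pv_equiv track=rewrite | github.com/SrikarRavindra/CodeBatSolutions | Python/Warmup-2/last2.py | last2
-- ===== SOURCE A (Python) =====
-- def last2(x):
--     x_end = x[len(x)-2:len(x)]
--     count = 0
--     for i in range(len(x)-2):
--         str = x[i:i+2]
--         if(str == x_end):
--             count += 1
--     return count
-- ===== SOURCE B (Python) =====
-- def last2(x):
--     pattern = x[len(x)-2:len(x)]
--     count = 0
--     start = 0
--     while True:
--         idx = x.find(pattern, start)
--         if idx == -1 or idx > len(x) - 3:
--             return count
--         count += 1
--         start = idx + 1
-- ===== Notes on version B (the rewrite author's own statement) =====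
-- stated objective: alternative
-- what changed: Replaces the per-index window comparison loop with a jump scan: repeatedly str.find(pattern, start) locates the next occurrence directly, counting it unless it is the final window (idx > len(x)-3) and advancing start = idx+1 to keep overlapping matches.
import Mathlib
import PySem

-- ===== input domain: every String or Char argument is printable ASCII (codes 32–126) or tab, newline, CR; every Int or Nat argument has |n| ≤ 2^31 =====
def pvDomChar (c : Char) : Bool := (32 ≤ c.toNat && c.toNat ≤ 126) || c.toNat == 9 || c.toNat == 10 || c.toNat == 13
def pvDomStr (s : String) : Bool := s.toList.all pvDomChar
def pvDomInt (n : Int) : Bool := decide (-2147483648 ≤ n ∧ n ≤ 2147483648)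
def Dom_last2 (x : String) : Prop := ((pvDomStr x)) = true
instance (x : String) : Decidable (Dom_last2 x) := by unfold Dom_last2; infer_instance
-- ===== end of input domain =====

-- B replaces the per-index window loop with a jump scan via str.find(pattern, start), counting overlapping matches (alternative decomposition, same asymptotic cost).

-- ===== PORT A =====
def last2 (x : String) : Int :=
  let x_end := PySem.Str.slice x (some (PySem.Str.len x - 2)) (some (PySem.Str.len x))
  (PySem.List.pyRange 0 (PySem.Str.len x - 2) 1).foldl
    (fun count i => if PySem.Str.slice x (some i) (some (i + 2)) == x_end then count + 1 else count) 0

-- ===== PORT B =====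
-- the Python 'while True' loop; fuel = len(x)+1 is a totality guard only (start grows each pass)
def last2_alt_go (x : String) (pattern : String) (fuel : Nat) (start : Int) (count : Int) : Int :=
  match fuel with
  | 0 => count
  | Nat.succ fuel' =>
    let idx := PySem.Str.findFrom x pattern start
    if idx == -1 || idx > PySem.Str.len x - 3 then count
    else last2_alt_go x pattern fuel' (idx + 1) (count + 1)

def last2_alt (x : String) : Int :=
  let pattern := PySem.Str.slice x (some (PySem.Str.len x - 2)) (some (PySem.Str.len x))
  last2_alt_go x pattern ((PySem.Str.len x).toNat + 1) 0 0

-- ===== PRECONDITION & SPEC =====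
def Spec_last2 (x : String) (out : Int) : Prop := out = last2_alt x
instance (x : String) (out : Int) : Decidable (Spec_last2 x out) := by unfold Spec_last2; infer_instance

-- ===== CLAIM (what is proved, stated in full; the proofs are below) =====
def Claim_equal_last2 : Prop := ∀ (x : String), Dom_last2 x → Spec_last2 x (last2 x)

-- ===== LEMMAS AND PROOFS =====

-- counting with two predicates that agree everywhere except at one element j of a Nodup list
theorem pvCountP_split (p q : Nat → Bool) (j : Nat) : ∀ (l : List Nat), l.Nodup → j ∈ l →
    p j = true → q j = false → (∀ i ∈ l, i ≠ j → p i = q i) →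
    l.countP p = l.countP q + 1 := by
  intro l
  induction l with
  | nil => intro _ h; cases h
  | cons hd tl ih =>
    intro hnd hmem hpj hqj hagree
    rcases List.mem_cons.mp hmem with rfl | hmem'
    · have htl : tl.countP p = tl.countP q := by
        apply List.countP_congr
        intro i hi
        rw [hagree i (List.mem_cons_of_mem _ hi)
          (fun h => (List.nodup_cons.mp hnd).1 (h ▸ hi))]
      simp [hpj, hqj, htl]
    · have hhd : p hd = q hd := hagree hd List.mem_cons_self
        (fun h => (List.nodup_cons.mp hnd).1 (h ▸ hmem'))
      have := ih (List.nodup_cons.mp hnd).2 hmem' hpj hqj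
        (fun i hi hne => hagree i (List.mem_cons_of_mem _ hi) hne)
      simp [List.countP_cons, hhd, this]; omega

-- a prefix of a later drop is an infix of an earlier drop
theorem pvPrefix_drop_infix (pat l : List Char) (s i : Nat) (hsi : s ≤ i)
    (h : pat <+: l.drop i) : pat <:+: l.drop s := by
  have h1 : l.drop i = (l.drop s).drop (i - s) := by
    rw [List.drop_drop]; congr 1; omega
  exact h.isInfix.trans (h1 ▸ (List.drop_suffix (i - s) (l.drop s)).isInfix)

-- loop invariant for B's jump scan: starting at s it adds the number of match
-- positions i ≥ s with i < len-2
theorem pvGoInv (x pat : String) : ∀ (fuel s : Nat) (count : Int),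
    s ≤ x.toList.length → x.toList.length + 1 - s ≤ fuel →
    last2_alt_go x pat fuel (s : Int) count
      = count + ((List.range (x.toList.length - 2)).countP
          (fun i => decide (s ≤ i ∧ pat.toList <+: x.toList.drop i)) : Int) := by
  intro fuel
  induction fuel with
  | zero => intro s count hs hf; omega
  | succ fuel' ih =>
    intro s count hs hf
    set l := x.toList with hl
    set patL := pat.toList with hpat
    unfold last2_alt_go
    have hidx : PySem.Str.findFrom x pat (s : Int) none
        = if PySem.Chars.find (l.drop s) patL = -1 then -1
          else (s : Int) + PySem.Chars.find (l.drop s) patL := by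
      rw [PySem.Str.findFrom_eq]
      exact PySem.Chars.findFrom_natCast l patL s (by omega)
    by_cases hF : PySem.Chars.find (l.drop s) patL = -1
    · -- no further occurrence: count stays
      rw [hidx, if_pos hF]
      simp only [beq_self_eq_true, Bool.true_or, if_true]
      have hzero : (List.range (l.length - 2)).countP
          (fun i => decide (s ≤ i ∧ patL <+: l.drop i)) = 0 := by
        apply List.countP_eq_zero.mpr
        intro i _
        simp only [decide_eq_true_eq]
        rintro ⟨hsi, hpre⟩
        exact (PySem.Chars.find_eq_neg_one_iff _ _).mp hF
          (pvPrefix_drop_infix patL l s i hsi hpre)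
      rw [hzero]; simp
    · have hF0 : 0 ≤ PySem.Chars.find (l.drop s) patL := by
        have := PySem.Chars.neg_one_le_find (l.drop s) patL
        omega
      set F := PySem.Chars.find (l.drop s) patL with hFdef
      obtain ⟨hpreF, hminF⟩ := PySem.Chars.find_spec hF0
      set j := s + F.toNat with hj
      have hjdrop : (l.drop s).drop F.toNat = l.drop j := by
        rw [List.drop_drop]
      have hidx' : PySem.Str.findFrom x pat (s : Int) none = (j : Int) := by
        rw [hidx, if_neg hF]; omega
      rw [hidx']
      by_cases hbig : (j : Int) > PySem.Str.len x - 3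
      · -- occurrence is the final window (or none in range): count stays
        rw [if_pos (by simp only [Bool.or_eq_true, decide_eq_true_eq]; exact Or.inr hbig)]
        have hzero : (List.range (l.length - 2)).countP
            (fun i => decide (s ≤ i ∧ patL <+: l.drop i)) = 0 := by
          apply List.countP_eq_zero.mpr
          intro i hi
          simp only [List.mem_range] at hi
          simp only [decide_eq_true_eq]
          rintro ⟨hsi, hpre⟩
          have hij : i < j := by
            have hb2 : (l.length : Int) - 3 < (j : Int) := by
              have := hbig
              simp only [PySem.Str.len_eq, ← hl, gt_iff_lt] at this
              omega
            omega
          have : ¬ patL <+: (l.drop s).drop (i - s) :=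
            hminF (i - s) (by omega)
          rw [List.drop_drop, show s + (i - s) = i by omega] at this
          exact this hpre
        rw [hzero]; simp
      · -- a counted occurrence: recurse past it
        have hjle : (j : Int) ≤ (l.length : Int) - 3 := by
          have := hbig; simp only [PySem.Str.len_eq, ← hl] at this; omega
        rw [if_neg (by
          simp only [Bool.or_eq_true, beq_iff_eq, decide_eq_true_eq, not_or]
          constructor
          · intro h; omega
          · simpa using hbig)]
        have hrec := ih (j + 1) (count + 1) (by omega) (by omega)
        rw [show (j : Int) + 1 = ((j + 1 : Nat) : Int) by push_cast; ring, hrec]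
        have hsplit : (List.range (l.length - 2)).countP
              (fun i => decide (s ≤ i ∧ patL <+: l.drop i))
            = (List.range (l.length - 2)).countP
              (fun i => decide (j + 1 ≤ i ∧ patL <+: l.drop i)) + 1 := by
          apply pvCountP_split _ _ j _ (List.nodup_range)
            (List.mem_range.mpr (by omega))
          · simp only [decide_eq_true_eq]
            exact ⟨by omega, hjdrop ▸ hpreF⟩
          · simp
          · intro i _ hne
            by_cases hge : j + 1 ≤ i
            · have hsi' : s ≤ i := by omega
              rw [decide_eq_decide]
              constructor
              · rintro ⟨-, h⟩; exact ⟨hge, h⟩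
              · rintro ⟨-, h⟩; exact ⟨hsi', h⟩
            · have hij : i < j := by omega
              by_cases hsi : s ≤ i
              · have hnp : ¬ patL <+: (l.drop s).drop (i - s) :=
                  hminF (i - s) (by omega)
                rw [List.drop_drop, show s + (i - s) = i by omega] at hnp
                rw [decide_eq_decide]
                constructor
                · rintro ⟨-, h⟩; exact absurd h hnp
                · rintro ⟨h, -⟩; exact absurd h hge
              · rw [decide_eq_decide]
                constructor
                · rintro ⟨h, -⟩; exact absurd h hsi
                · rintro ⟨h, -⟩; exact absurd h hge
        rw [hsplit]; push_cast; ring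

theorem last2_eq (x : String) : last2 x = last2_alt x := by
  unfold last2 last2_alt
  rw [PySem.List.foldl_if_add_one]
  set l := x.toList with hl
  have hB := pvGoInv x
    (PySem.Str.slice x (some (PySem.Str.len x - 2)) (some (PySem.Str.len x)))
    ((PySem.Str.len x).toNat + 1) 0 0 (by omega)
    (by simp only [PySem.Str.len_eq, ← hl]; omega)
  rw [show ((0 : Nat) : Int) = (0 : Int) by norm_num] at hB
  rw [hB]
  rw [PySem.List.pyRange_one, List.countP_map,
      show (PySem.Str.len x - 2 - 0).toNat = l.length - 2 by
        simp only [PySem.Str.len_eq, ← hl]; omega]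
  simp only [zero_add, Nat.cast_inj]
  apply List.countP_congr
  intro i hi
  simp only [List.mem_range] at hi
  have hn : 3 ≤ l.length := by omega
  have hpatL : (PySem.Str.slice x (some (PySem.Str.len x - 2))
      (some (PySem.Str.len x))).toList = (l.drop (l.length - 2)).take 2 := by
    simp only [PySem.Str.toList_slice, PySem.Chars.slice_eq_listSlice, PySem.Str.len_eq, ← hl]
    rw [show (l.length : Int) - 2 = ((l.length - 2 : Nat) : Int) by omega,
        show (l.length : Int) = ((l.length - 2 : Nat) : Int) + ((2 : Nat) : Int) by omega,
        PySem.List.slice_natCast_add]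
  have hpatlen : ((l.drop (l.length - 2)).take 2).length = 2 := by
    simp; omega
  have hsl : (PySem.Str.slice x (some ((i : Int))) (some ((i : Int) + 2))).toList
      = (l.drop i).take 2 := by
    simp only [PySem.Str.toList_slice, PySem.Chars.slice_eq_listSlice, ← hl,
      show ((i : Int) + 2) = ((i : Nat) : Int) + ((2 : Nat) : Int) by norm_num]
    rw [PySem.List.slice_natCast_add]
  rw [Bool.eq_iff_iff]
  simp only [Function.comp_apply, beq_iff_eq, decide_eq_true_eq]
  rw [← String.toList_inj, hsl, hpatL]
  rw [List.prefix_iff_eq_take, hpatlen]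
  constructor
  · intro h; exact ⟨Nat.zero_le i, (h.mpr trivial).symm⟩
  · intro h; exact iff_of_true h.2.symm trivial

-- ===== VERDICT (by name: the statement is the Claim_ definition above) =====
theorem last2_spec : Claim_equal_last2 := by
  intro x _
  unfold Spec_last2
  exact last2_eq x
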